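-- pv_equiv track=rewrite | github.com/smnikolakaki/submodular-linear-cost-maximization | submodular_optimization/algorithms/scaled_single_threshold_greedy.py | update_set_keys
-- ===== SOURCE A (Python) =====
-- def update_set_keys(S,O):
--     """
--     Updates the sets of the thresholds
--     :param S:
--     :param O:
--     :return S:
--     """
--     # Create empty Sv for v in Oi that are new
--     for v in O:
--         if v not in S:
--             S[v] = set()
--
--     # Delete sets Sv for v that do not exist in Oi
--     S_vs = set(S.keys())
--     remove_vs = S_vs - O
--     for v in remove_vs:
--         del S[v]
--
--     return S
-- ===== SOURCE B (Python) =====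
-- def update_set_keys(S, O):
--     """Rebuild: keep surviving entries, add fresh empty sets for new keys, then overwrite S in place."""
--     kept = [(k, sv) for k, sv in S.items() if k in O]
--     fresh = [(v, set()) for v in O if v not in S]
--     S.clear()
--     S.update(kept)
--     S.update(fresh)
--     return S
-- ===== Notes on version B (the rewrite author's own statement) =====
-- stated objective: simpler
-- what changed: A's conditional-insert loop followed by a key-set difference and a delete loop is replaced by a single rebuild: filter the surviving items, append fresh empty sets for new keys, then clear-and-update S in place.
import Mathlib
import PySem

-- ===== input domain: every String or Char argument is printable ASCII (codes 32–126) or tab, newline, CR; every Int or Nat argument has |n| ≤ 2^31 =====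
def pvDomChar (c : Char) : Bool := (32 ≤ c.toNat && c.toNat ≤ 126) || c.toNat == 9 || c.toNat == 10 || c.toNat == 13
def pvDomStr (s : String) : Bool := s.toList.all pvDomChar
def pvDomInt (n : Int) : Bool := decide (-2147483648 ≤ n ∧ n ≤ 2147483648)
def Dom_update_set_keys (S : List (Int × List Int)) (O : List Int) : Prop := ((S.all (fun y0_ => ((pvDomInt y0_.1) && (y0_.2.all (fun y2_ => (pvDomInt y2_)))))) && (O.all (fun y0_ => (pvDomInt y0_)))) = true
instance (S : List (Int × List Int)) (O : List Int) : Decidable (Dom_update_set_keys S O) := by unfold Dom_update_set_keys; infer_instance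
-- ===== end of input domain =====

-- B rebuilds the dict (surviving items, then fresh empty sets for new keys) instead of A's
-- insert-then-delete mutation loops; B's Python performs the same in-place mutation of S
-- (clear + update) as A's net effect, so the side effect on S matches too.

-- ===== PORT A =====
def update_set_keys (S : List (Int × List Int)) (O : List Int) : List (Int × List Int) :=
  let d : PySem.Dict Int (List Int) := PySem.Dict.ofList S
  let o : PySem.Set Int := PySem.Set.ofList O
  -- for v in O: if v not in S: S[v] = set()
  let d1 := o.foldl (fun d v => if d.contains v then d else d.insert v ([] : List Int)) d
  -- S_vs = set(S.keys()); remove_vs = S_vs - O; for v in remove_vs: del S[v]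
  let svs : PySem.Set Int := PySem.Set.ofList d1.keys
  let removeVs := PySem.Set.diff svs o
  (removeVs.foldl (fun d v => d.erase v) d1).items

-- ===== PORT B =====
def update_set_keys_alt (S : List (Int × List Int)) (O : List Int) : List (Int × List Int) :=
  let d : PySem.Dict Int (List Int) := PySem.Dict.ofList S
  let o : PySem.Set Int := PySem.Set.ofList O
  -- kept = [(k, sv) for k, sv in S.items() if k in O]
  let kept := d.items.filter (fun p => o.contains p.1)
  -- fresh = [(v, set()) for v in O if v not in S]
  let fresh := (o.filter (fun v => !(d.contains v))).map (fun v => (v, ([] : List Int)))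
  -- S.clear(); S.update(kept); S.update(fresh); return S
  ((PySem.Dict.empty.update kept).update fresh).items

-- ===== PRECONDITION & SPEC =====
def Spec_update_set_keys (S : List (Int × List Int)) (O : List Int) (out : List (Int × List Int)) : Prop := out = update_set_keys_alt S O
instance (S : List (Int × List Int)) (O : List Int) (out : List (Int × List Int)) : Decidable (Spec_update_set_keys S O out) := by unfold Spec_update_set_keys; infer_instance

-- ===== CLAIM (what is proved, stated in full; the proofs are below) =====
def Claim_equal_update_set_keys : Prop := ∀ (S : List (Int × List Int)) (O : List Int), Dom_update_set_keys S O → Spec_update_set_keys S O (update_set_keys S O)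

-- ===== LEMMAS AND PROOFS =====

-- A's conditional-insert loop over distinct keys appends exactly the fresh (v, ∅) pairs.
theorem pv_insert_loop_items (o : List Int) (d : PySem.Dict Int (List Int)) (hnd : o.Nodup) :
    (o.foldl (fun d v => if d.contains v then d else d.insert v ([] : List Int)) d).items
      = d.items ++ (o.filter (fun v => !(d.contains v))).map (fun v => (v, ([] : List Int))) := by
  induction o generalizing d with
  | nil => simp
  | cons v o ih =>
    have hv : v ∉ o := (List.nodup_cons.mp hnd).1
    have hnd' : o.Nodup := (List.nodup_cons.mp hnd).2
    by_cases h : d.contains v = true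
    · simp [List.foldl_cons, h, ih _ hnd']
    · have h' : d.contains v = false := by simpa using h
      rw [List.foldl_cons, if_neg (by simp [h']), ih _ hnd',
        PySem.Dict.items_insert_of_not_contains d ([] : List Int) h']
      have hf : o.filter (fun u => !((d.insert v ([] : List Int)).contains u))
          = o.filter (fun u => !(d.contains u)) := by
        apply List.filter_congr
        intro u hu
        have huv : (u == v) = false := by
          simp only [beq_eq_false_iff_ne]
          exact fun he => hv (he ▸ hu)
        simp [PySem.Dict.contains_insert, huv]
      simp [hf, h']

-- A's delete loop filters out every item whose key is in the removal list.
theorem pv_erase_loop_items (R : List Int) (d : PySem.Dict Int (List Int)) :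
    (R.foldl (fun d v => d.erase v) d).items
      = d.items.filter (fun p => !(R.contains p.1)) := by
  induction R generalizing d with
  | nil => simp
  | cons v R ih =>
    rw [List.foldl_cons, ih]
    show ((d.erase v).items).filter _ = _
    rw [PySem.Dict.erase, List.filter_filter]
    apply List.filter_congr
    intro p _
    rw [List.contains_cons, Bool.not_or, Bool.and_comm]

-- Both ports produce the surviving items followed by the fresh pairs.
theorem pv_A_items (d : PySem.Dict Int (List Int)) (o : PySem.Set Int) (hod : o.Nodup) :
    ((PySem.Set.diff (PySem.Set.ofList
        (o.foldl (fun d v => if d.contains v then d else d.insert v ([] : List Int)) d).keys) o).foldl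
      (fun d v => d.erase v)
      (o.foldl (fun d v => if d.contains v then d else d.insert v ([] : List Int)) d)).items
    = d.items.filter (fun p => o.contains p.1)
      ++ (o.filter (fun v => !(d.contains v))).map (fun v => (v, ([] : List Int))) := by
  set d1 := o.foldl (fun d v => if d.contains v then d else d.insert v ([] : List Int)) d with hd1
  set fresh := (o.filter (fun v => !(d.contains v))).map (fun v => (v, ([] : List Int))) with hfresh
  have h1 : d1.items = d.items ++ fresh := pv_insert_loop_items o d hod
  rw [pv_erase_loop_items]
  have h2 : ∀ p ∈ d1.items,
      (!(List.contains (PySem.Set.diff (PySem.Set.ofList d1.keys) o) p.1))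
        = o.contains p.1 := by
    intro p hp
    have hk : p.1 ∈ d1.keys := by
      simp only [PySem.Dict.keys]
      exact List.mem_map_of_mem hp
    cases hoc : o.contains p.1 with
    | true =>
      simp [PySem.Set.diff]
      exact Or.inr (by simpa using hoc)
    | false =>
      have hno : p.1 ∉ o := by simpa using hoc
      have hmem : p.1 ∈ PySem.Set.diff (PySem.Set.ofList d1.keys) o :=
        List.mem_filter.mpr ⟨(PySem.Set.mem_ofList _ _).mpr hk, by simpa using hno⟩
      simp [hmem]
  rw [List.filter_congr h2, h1, List.filter_append]
  have h3 : fresh.filter (fun p => o.contains p.1) = fresh := by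
    rw [List.filter_eq_self]
    intro p hp
    rw [hfresh] at hp
    obtain ⟨v, hv, rfl⟩ := List.mem_map.mp hp
    simpa using List.mem_of_mem_filter hv
  rw [h3]

theorem pv_B_items (d : PySem.Dict Int (List Int)) (o : PySem.Set Int) (hod : o.Nodup)
    (hdk : d.keys.Nodup) :
    ((PySem.Dict.empty.update (d.items.filter (fun p => o.contains p.1))).update
        ((o.filter (fun v => !(d.contains v))).map (fun v => (v, ([] : List Int))))).items
    = d.items.filter (fun p => o.contains p.1)
      ++ (o.filter (fun v => !(d.contains v))).map (fun v => (v, ([] : List Int))) := by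
  set kept := d.items.filter (fun p => o.contains p.1) with hkept
  set fresh := (o.filter (fun v => !(d.contains v))).map (fun v => (v, ([] : List Int))) with hfresh
  have hkeptnd : (kept.map Prod.fst).Nodup := by
    have hs : (kept.map Prod.fst).Sublist (d.items.map Prod.fst) :=
      List.Sublist.map Prod.fst List.filter_sublist
    exact hdk.sublist hs
  have hce : ∀ a ∈ kept, (PySem.Dict.empty : PySem.Dict Int (List Int)).contains a.1 = false := by
    intro a _; simp
  have hu1 : (PySem.Dict.empty.update kept).items = kept := by
    show (List.foldl (fun (acc : PySem.Dict Int (List Int)) p => acc.insert p.1 p.2)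
      PySem.Dict.empty kept).items = kept
    rw [PySem.Dict.items_foldl_insert_fresh kept Prod.fst Prod.snd PySem.Dict.empty hce hkeptnd]
    simp [PySem.Dict.empty]
  have hfreshnd : (fresh.map Prod.fst).Nodup := by
    have hid : (Prod.fst ∘ fun v : Int => (v, ([] : List Int))) = id := rfl
    rw [hfresh, List.map_map, hid, List.map_id]
    exact hod.filter _
  have hfreshkeys : ∀ a ∈ fresh, (PySem.Dict.empty.update kept).contains a.1 = false := by
    intro a ha
    rw [hfresh] at ha
    obtain ⟨v, hv, rfl⟩ := List.mem_map.mp ha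
    have hvd : d.contains v = false := by simpa using (List.mem_filter.mp hv).2
    cases hc : ((PySem.Dict.empty.update kept).contains v) with
    | false => rfl
    | true =>
      exfalso
      have hmem : v ∈ (PySem.Dict.empty.update kept).keys :=
        (PySem.Dict.contains_iff_mem_keys ..).mp hc
      rw [PySem.Dict.keys, hu1] at hmem
      obtain ⟨p, hp, hpe⟩ := List.mem_map.mp hmem
      have hcv : d.contains v = true := by
        apply (PySem.Dict.contains_iff_mem_keys ..).mpr
        rw [PySem.Dict.keys]
        exact hpe ▸ List.mem_map_of_mem (List.mem_of_mem_filter hp)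
      rw [hvd] at hcv; cases hcv
  show (List.foldl (fun (acc : PySem.Dict Int (List Int)) p => acc.insert p.1 p.2)
    (PySem.Dict.empty.update kept) fresh).items = _
  rw [PySem.Dict.items_foldl_insert_fresh fresh Prod.fst Prod.snd _ hfreshkeys hfreshnd]
  simp [hu1]

-- ===== VERDICT (by name: the statement is the Claim_ definition above) =====
theorem update_set_keys_spec : Claim_equal_update_set_keys := by
  intro S O _
  unfold Spec_update_set_keys update_set_keys update_set_keys_alt
  simp only []
  rw [pv_A_items (PySem.Dict.ofList S) (PySem.Set.ofList O) (PySem.Set.nodup_ofList O),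
    pv_B_items (PySem.Dict.ofList S) (PySem.Set.ofList O) (PySem.Set.nodup_ofList O)
      (PySem.Dict.nodup_keys_ofList S)]
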